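-- pv_equiv track=rewrite | github.com/kkr010128/codebert | problem296/problem296_109.py | return_internal_same
-- ===== SOURCE A (Python) =====
-- def return_internal_same(ls):
--     i = 0
--     same_count = 1
--     return_value = 0
--     while i < len(ls)-1:
--         if ls[i] != ls[i+1]:
--             i += 1
--             return_value += same_count // 2
--             same_count = 1
--             continue
--         else:
--             same_count += 1
--             i += 1
--     return_value += same_count // 2
--     return return_value
-- ===== SOURCE B (Python) =====
-- def return_internal_same(ls):
--     # Greedy pairing: scan left to right, pairing each adjacent equal pair and
--     # skipping past it; the number of pairs formed equals sum(run_len//2).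
--     total = 0
--     i = 0
--     while i + 1 < len(ls):
--         if ls[i] == ls[i + 1]:
--             total += 1
--             i += 2
--         else:
--             i += 1
--     return total
-- ===== Notes on version B (the rewrite author's own statement) =====
-- stated objective: alternative
-- what changed: Replaces the run-length counter with a flush-on-change floor-division by a greedy two-pointer pairing scan that counts disjoint adjacent equal pairs (skipping two on a match), performing no division at all.
import Mathlib
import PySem

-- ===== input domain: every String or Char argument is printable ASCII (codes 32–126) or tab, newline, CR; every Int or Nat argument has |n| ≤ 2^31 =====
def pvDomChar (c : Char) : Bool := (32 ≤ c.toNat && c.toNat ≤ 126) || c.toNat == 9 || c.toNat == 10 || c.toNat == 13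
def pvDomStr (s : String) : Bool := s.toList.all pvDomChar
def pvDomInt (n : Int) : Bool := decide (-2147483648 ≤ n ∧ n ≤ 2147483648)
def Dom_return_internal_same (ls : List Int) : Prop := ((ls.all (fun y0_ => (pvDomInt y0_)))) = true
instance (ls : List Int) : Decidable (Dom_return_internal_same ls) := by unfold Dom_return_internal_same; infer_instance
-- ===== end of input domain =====

-- B replaces A's run-length counter (flush same_count//2 on change) by a greedy scan that
-- counts disjoint adjacent equal pairs, skipping two on a match; objective: alternative.

-- ===== PORT A =====
-- A's while loop over index i, keeping same_count and return_value; the advancing index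
-- is rendered as recursion on the remaining suffix (ls[i] = head, ls[i+1] = next).
def pvALoop : List Int → Int → Int → Int
  | x :: y :: rest, sc, rv =>
    if x ≠ y then pvALoop (y :: rest) 1 (rv + PySem.Int.floordiv sc 2)
    else pvALoop (y :: rest) (sc + 1) rv
  | _, sc, rv => rv + PySem.Int.floordiv sc 2

def return_internal_same (ls : List Int) : Int := pvALoop ls 1 0

-- ===== PORT B =====
-- Source B's loop: total accumulator; on ls[i] == ls[i+1] count one pair and advance by 2, else by 1.
def pvBLoop : List Int → Int → Int
  | x :: y :: rest, t => if x = y then pvBLoop rest (t + 1) else pvBLoop (y :: rest) t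
  | _, t => t

def return_internal_same_alt (ls : List Int) : Int := pvBLoop ls 0

-- ===== PRECONDITION & SPEC =====
def Spec_return_internal_same (ls : List Int) (out : Int) : Prop := out = return_internal_same_alt ls
instance (ls : List Int) (out : Int) : Decidable (Spec_return_internal_same ls out) := by unfold Spec_return_internal_same; infer_instance

-- ===== CLAIM (what is proved, stated in full; the proofs are below) =====
def Claim_equal_return_internal_same : Prop := ∀ (ls : List Int), Dom_return_internal_same ls → Spec_return_internal_same ls (return_internal_same ls)

-- ===== LEMMAS AND PROOFS =====

theorem pvBLoop_acc : ∀ (l : List Int) (t : Int), pvBLoop l t = t + pvBLoop l 0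
  | [], t => by simp [pvBLoop]
  | [_], t => by simp [pvBLoop]
  | x :: y :: rest, t => by
    by_cases h : x = y
    · simp only [pvBLoop, if_pos h]
      rw [pvBLoop_acc rest (t + 1), pvBLoop_acc rest (0 + 1)]; ring
    · simp only [pvBLoop, if_neg h]
      exact pvBLoop_acc (y :: rest) t
termination_by l _ => l.length
decreasing_by all_goals (simp only [List.length_cons]; omega)

theorem pvKey (l : List Int) : ∀ (x sc rv : Int), 1 ≤ sc →
    pvALoop (x :: l) sc rv =
      rv + PySem.Int.floordiv sc 2 +
        (if sc % 2 = 1 then pvBLoop (x :: l) 0 else pvBLoop l 0) := by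
  induction l with
  | nil =>
    intro x sc rv hsc
    simp only [pvALoop, pvBLoop]
    split_ifs <;> ring
  | cons y l' ih =>
    intro x sc rv hsc
    have hfd : ∀ z : Int, PySem.Int.floordiv z 2 = z / 2 := fun z =>
      PySem.Int.floordiv_eq_ediv_of_pos (by omega)
    by_cases hxy : x = y
    · subst hxy
      rw [show pvALoop (x :: x :: l') sc rv = pvALoop (x :: l') (sc + 1) rv by
            simp [pvALoop],
          ih x (sc + 1) rv (by omega)]
      have hB : pvBLoop (x :: x :: l') 0 = 1 + pvBLoop l' 0 := by
        rw [show pvBLoop (x :: x :: l') 0 = pvBLoop l' (0 + 1) by simp [pvBLoop],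
            pvBLoop_acc l' (0 + 1)]
        norm_num
      rcases Int.emod_two_eq sc with hp | hp
      · rw [if_pos (show (sc + 1) % 2 = 1 by omega), if_neg (show ¬ sc % 2 = 1 by omega),
            hfd, hfd, show (sc + 1) / 2 = sc / 2 by omega]
      · rw [if_neg (show ¬ (sc + 1) % 2 = 1 by omega), if_pos hp, hB,
            hfd, hfd, show (sc + 1) / 2 = sc / 2 + 1 by omega]
        ring
    · rw [show pvALoop (x :: y :: l') sc rv
            = pvALoop (y :: l') 1 (rv + PySem.Int.floordiv sc 2) by simp [pvALoop, hxy],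
          ih y 1 _ (by omega), if_pos (by decide : (1 : Int) % 2 = 1),
          show PySem.Int.floordiv 1 2 = 0 from by decide]
      have hB : pvBLoop (x :: y :: l') 0 = pvBLoop (y :: l') 0 := by
        simp [pvBLoop, hxy]
      by_cases hp : sc % 2 = 1
      · rw [if_pos hp, hB]; ring
      · rw [if_neg hp]; ring

-- ===== VERDICT (by name: the statement is the Claim_ definition above) =====
theorem return_internal_same_spec : Claim_equal_return_internal_same := by
  intro ls _
  unfold Spec_return_internal_same return_internal_same return_internal_same_alt
  cases ls with
  | nil => decide
  | cons x l =>
    rw [pvKey l x 1 0 (by omega), if_pos (by decide : (1 : Int) % 2 = 1),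
        show PySem.Int.floordiv 1 2 = 0 from by decide]
    ring
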